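-- pv_equiv track=rewrite | github.com/diegoperea20/mafia-game | app/app.py | contar_roles
-- ===== SOURCE A (Python) =====
-- def contar_roles(jugadores):
--     civiles_total = 0
--     mafia_total = 0
--     for rol in jugadores.values():
--         if rol == "civil":
--             civiles_total += 1
--         else:
--             mafia_total += 1
--     return civiles_total, mafia_total
-- ===== SOURCE B (Python) =====
-- def contar_roles(jugadores):
--     conteo = {}
--     for rol in jugadores.values():
--         conteo[rol] = conteo.get(rol, 0) + 1
--     civiles_total = conteo.pop("civil", 0)
--     return civiles_total, sum(conteo.values())
-- ===== Notes on version B (the rewrite author's own statement) =====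
-- stated objective: alternative
-- what changed: B builds a frequency histogram (dict rol -> count) of the role values in one pass, pops the 'civil' bucket for the civil count and sums the remaining buckets for mafia, instead of A's paired two-counter if/else loop.
import Mathlib
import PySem

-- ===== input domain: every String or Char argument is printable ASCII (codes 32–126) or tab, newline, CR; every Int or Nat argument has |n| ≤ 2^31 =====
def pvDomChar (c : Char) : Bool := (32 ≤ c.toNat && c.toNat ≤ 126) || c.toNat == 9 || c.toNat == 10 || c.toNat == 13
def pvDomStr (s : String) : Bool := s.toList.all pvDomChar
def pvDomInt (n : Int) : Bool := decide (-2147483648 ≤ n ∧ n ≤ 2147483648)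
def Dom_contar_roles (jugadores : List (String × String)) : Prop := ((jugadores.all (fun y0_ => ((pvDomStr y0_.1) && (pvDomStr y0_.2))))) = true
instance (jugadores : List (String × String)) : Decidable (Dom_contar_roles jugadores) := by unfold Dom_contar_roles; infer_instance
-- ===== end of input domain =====

-- B builds a frequency histogram of the role values once, pops the 'civil' bucket and sums the remaining buckets (alternative data structure, same cost).

-- ===== PORT A =====
-- two running counters, incremented in an if/else over the dict's values
def contar_roles (jugadores : List (String × String)) : Int × Int :=
  ((PySem.Dict.ofList jugadores).values).foldl
    (fun acc rol =>
      if rol == "civil" then (acc.1 + 1, acc.2) else (acc.1, acc.2 + 1))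
    ((0 : Int), (0 : Int))

-- ===== PORT B =====
-- conteo[rol] = conteo.get(rol, 0) + 1 over the values; then pop("civil", 0) and sum the rest
def contar_roles_alt (jugadores : List (String × String)) : Int × Int :=
  let conteo := ((PySem.Dict.ofList jugadores).values).foldl
    (fun d rol => d.insert rol (d.getD rol 0 + 1)) PySem.Dict.empty
  let civiles_total : Int := conteo.getD "civil" 0   -- pop("civil", 0): value …
  let conteo := conteo.erase "civil"                 -- … and removal
  (civiles_total, conteo.values.foldl (fun acc n => acc + n) 0)

-- ===== PRECONDITION & SPEC =====
def Spec_contar_roles (jugadores : List (String × String)) (out : Int × Int) : Prop := out = contar_roles_alt jugadores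
instance (jugadores : List (String × String)) (out : Int × Int) : Decidable (Spec_contar_roles jugadores out) := by unfold Spec_contar_roles; infer_instance

-- ===== CLAIM (what is proved, stated in full; the proofs are below) =====
def Claim_equal_contar_roles : Prop := ∀ (jugadores : List (String × String)), Dom_contar_roles jugadores → Spec_contar_roles jugadores (contar_roles jugadores)

-- ===== LEMMAS AND PROOFS =====

-- A's paired-counter fold computes (count "civil", length - count "civil")
theorem contar_roles_foldl_counts (l : List String) (c m : Int) :
    l.foldl (fun acc rol => if rol == "civil" then (acc.1 + 1, acc.2) else (acc.1, acc.2 + 1)) (c, m)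
      = (c + (l.count "civil" : Nat),
         m + ((l.length - l.count "civil" : Nat) : Int)) := by
  induction l generalizing c m with
  | nil => simp
  | cons x xs ih =>
    have hle := List.count_le_length (l := xs) (a := "civil")
    simp only [List.foldl_cons, List.count_cons, List.length_cons]
    by_cases hx : (x == "civil") = true
    · simp only [hx, if_true, ih, Prod.mk.injEq]
      refine ⟨?_, ?_⟩ <;> push_cast <;> omega
    · simp only [hx, if_false, ih, Prod.mk.injEq, Bool.false_eq_true]
      refine ⟨?_, ?_⟩ <;> push_cast <;> omega

-- sum of the non-"civil" histogram buckets = length - count "civil"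
theorem sum_counts_erase (xs : List String) :
    ((((PySem.Set.ofList xs : List String)).filter (fun k => !(k == "civil"))).map
        (fun k => (xs.count k : Int))).sum
      = (xs.length : Int) - (xs.count "civil" : Nat) := by
  have hnd : ((PySem.Set.ofList xs : List String)).Nodup := PySem.Set.nodup_ofList xs
  have hndf := hnd.filter (p := fun k => !(k == "civil"))
  rw [← List.sum_toFinset (f := fun k => (xs.count k : Int)) hndf]
  have hset : ((((PySem.Set.ofList xs : List String)).filter (fun k => !(k == "civil"))).toFinset)
      = xs.toFinset.erase "civil" := by
    ext k
    simp only [List.mem_toFinset, List.mem_filter, PySem.Set.mem_ofList, Finset.mem_erase,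
      Bool.not_eq_eq_eq_not, Bool.not_true, beq_eq_false_iff_ne, ne_eq]
    tauto
  rw [hset]
  have hlen : ∑ a ∈ xs.toFinset, ((xs.count a : Nat) : Int) = (xs.length : Int) := by
    rw [← Nat.cast_sum]
    exact_mod_cast congrArg (Nat.cast : Nat → Int) (List.sum_toFinset_count_eq_length xs)
  by_cases hc : "civil" ∈ xs.toFinset
  · rw [Finset.sum_erase_eq_sub (f := fun k => (xs.count k : Int)) hc, hlen]
  · have h0 : xs.count "civil" = 0 := by
      rw [List.count_eq_zero]
      simpa [List.mem_toFinset] using hc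
    rw [Finset.erase_eq_of_notMem hc, hlen, h0]
    simp

-- ===== VERDICT (by name: the statement is the Claim_ definition above) =====
theorem contar_roles_spec : Claim_equal_contar_roles := by
  intro jugadores _
  unfold Spec_contar_roles contar_roles contar_roles_alt
  rw [contar_roles_foldl_counts]
  simp only [PySem.Dict.foldl_insert_getD_add_one_eq_counter, PySem.Dict.getD_counter]
  set xs := (PySem.Dict.ofList jugadores).values with hxs
  have hvals : (((PySem.Dict.counter xs).erase "civil").values)
      = (((PySem.Set.ofList xs : List String)).filter (fun k => !(k == "civil"))).map
          (fun k => (xs.count k : Int)) := by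
    simp only [PySem.Dict.erase, PySem.Dict.values, PySem.Dict.items_counter, List.filter_map,
      List.map_map]
    rfl
  rw [hvals, PySem.List.foldl_add (g := fun n => n)]
  simp only [List.map_id', zero_add, Prod.mk.injEq]
  rw [sum_counts_erase]
  have hle := List.count_le_length (l := xs) (a := "civil")
  rw [Nat.cast_sub hle]
  exact ⟨trivial, rfl⟩
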